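-- pv_equiv track=rewrite | github.com/pypi-data/pypi-mirror-356 | packages/pbshm-network-mcs/pbshm_network_mcs-0.1.1.tar.gz/pbshm_network_mcs-0.1.1/pbshm/graphcomparison/backtracking.py | compatible_heuristic
-- ===== SOURCE A (Python) =====
-- def compatible_heuristic(neighbourhood1, neighbourhood2, current_solution):
-- 	# My best guess as to the heuristic in the paper by Cao
-- 	# Enforces induced subgraphs
-- 	correspondence_set1 = set()
-- 	correspondence_set2 = set()
-- 	for pair_of_vertices in current_solution:
-- 		vertex1, vertex2 = pair_of_vertices
-- 		if vertex1 in neighbourhood1: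
-- 			correspondence_set1.add(pair_of_vertices)
-- 		if vertex2 in neighbourhood2:
-- 			correspondence_set2.add(pair_of_vertices)
-- 	if len(correspondence_set1) == len(correspondence_set2):
-- 		if correspondence_set1 == correspondence_set2:
-- 			return True
-- 	return False
-- ===== SOURCE B (Python) =====
-- def compatible_heuristic(neighbourhood1, neighbourhood2, current_solution):
--     # One short-circuiting pass: a pair belongs to both correspondence sets or
--     # to neither iff the two membership tests agree; no sets are built.
--     return all((vertex1 in neighbourhood1) == (vertex2 in neighbourhood2)
--                for vertex1, vertex2 in current_solution)
-- ===== Notes on version B (the rewrite author's own statement) =====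
-- stated objective: simpler
-- what changed: Replaces building two correspondence sets and comparing their lengths and contents by a single short-circuiting pass that checks, for each pair, that the two membership tests agree.
import Mathlib
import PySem

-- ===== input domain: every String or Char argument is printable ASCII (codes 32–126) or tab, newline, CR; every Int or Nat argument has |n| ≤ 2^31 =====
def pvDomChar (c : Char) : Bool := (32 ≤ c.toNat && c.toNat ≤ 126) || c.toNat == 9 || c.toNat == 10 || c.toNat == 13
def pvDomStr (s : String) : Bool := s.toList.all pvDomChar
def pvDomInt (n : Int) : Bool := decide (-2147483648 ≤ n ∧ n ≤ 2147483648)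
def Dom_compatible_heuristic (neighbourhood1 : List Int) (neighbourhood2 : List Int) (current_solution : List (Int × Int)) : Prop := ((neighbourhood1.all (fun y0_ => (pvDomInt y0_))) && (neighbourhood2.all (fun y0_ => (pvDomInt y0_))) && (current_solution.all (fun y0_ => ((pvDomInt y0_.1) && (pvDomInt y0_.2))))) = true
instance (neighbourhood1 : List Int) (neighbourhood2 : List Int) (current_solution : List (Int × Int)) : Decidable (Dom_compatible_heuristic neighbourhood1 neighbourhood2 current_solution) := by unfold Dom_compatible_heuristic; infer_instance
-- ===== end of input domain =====

-- B replaces the two accumulated correspondence sets and their comparison by one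
-- short-circuiting pass checking the two membership tests agree on each pair (simpler).

-- ===== PORT A =====
-- one loop building both sets, then len check, then set equality, as in the Python
def compatible_heuristic (neighbourhood1 : List Int) (neighbourhood2 : List Int) (current_solution : List (Int × Int)) : Bool :=
  let acc := current_solution.foldl
    (fun (acc : PySem.Set (Int × Int) × PySem.Set (Int × Int)) pair_of_vertices =>
      (if neighbourhood1.contains pair_of_vertices.1 then PySem.Set.add acc.1 pair_of_vertices else acc.1,
       if neighbourhood2.contains pair_of_vertices.2 then PySem.Set.add acc.2 pair_of_vertices else acc.2))
    (PySem.Set.empty, PySem.Set.empty)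
  if PySem.Set.len acc.1 == PySem.Set.len acc.2 then
    if PySem.Set.equal acc.1 acc.2 then true else false
  else false

-- ===== PORT B =====
def compatible_heuristic_alt (neighbourhood1 : List Int) (neighbourhood2 : List Int) (current_solution : List (Int × Int)) : Bool :=
  current_solution.all (fun p => neighbourhood1.contains p.1 == neighbourhood2.contains p.2)

-- ===== PRECONDITION & SPEC =====
def Spec_compatible_heuristic (neighbourhood1 : List Int) (neighbourhood2 : List Int) (current_solution : List (Int × Int)) (out : Bool) : Prop := out = compatible_heuristic_alt neighbourhood1 neighbourhood2 current_solution
instance (neighbourhood1 : List Int) (neighbourhood2 : List Int) (current_solution : List (Int × Int)) (out : Bool) : Decidable (Spec_compatible_heuristic neighbourhood1 neighbourhood2 current_solution out) := by unfold Spec_compatible_heuristic; infer_instance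

-- ===== CLAIM (what is proved, stated in full; the proofs are below) =====
def Claim_equal_compatible_heuristic : Prop := ∀ (neighbourhood1 : List Int) (neighbourhood2 : List Int) (current_solution : List (Int × Int)), Dom_compatible_heuristic neighbourhood1 neighbourhood2 current_solution → Spec_compatible_heuristic neighbourhood1 neighbourhood2 current_solution (compatible_heuristic neighbourhood1 neighbourhood2 current_solution)

-- ===== LEMMAS AND PROOFS =====

-- the loop's pair of accumulators splits into two independent folds
theorem pv_pair_foldl (n1 n2 : List Int) (l : List (Int × Int))
    (s1 s2 : PySem.Set (Int × Int)) :
    l.foldl (fun acc p =>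
        (if n1.contains p.1 then PySem.Set.add acc.1 p else acc.1,
         if n2.contains p.2 then PySem.Set.add acc.2 p else acc.2)) (s1, s2)
      = (l.foldl (fun s p => if n1.contains p.1 then PySem.Set.add s p else s) s1,
         l.foldl (fun s p => if n2.contains p.2 then PySem.Set.add s p else s) s2) := by
  induction l generalizing s1 s2 with
  | nil => rfl
  | cons p l ih => simp only [List.foldl_cons]; exact ih _ _

-- a conditional-add fold is an update by the filtered list
theorem pv_foldl_filter {α : Type} [BEq α] [LawfulBEq α] (q : α → Bool)
    (l : List α) (s : PySem.Set α) :
    l.foldl (fun s p => if q p then PySem.Set.add s p else s) s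
      = PySem.Set.update s (l.filter q) := by
  induction l generalizing s with
  | nil => simp [PySem.Set.update]
  | cons p l ih =>
    by_cases h : q p = true
    · simp [h, ih, PySem.Set.update_cons]
    · simp [h, ih]

theorem pv_update_empty {α : Type} [BEq α] (xs : List α) :
    PySem.Set.update (PySem.Set.empty : PySem.Set α) xs = PySem.Set.ofList xs := rfl

-- set equality of the two filtered sets is the pointwise agreement of the filters
theorem pv_equal_filter (q1 q2 : Int × Int → Bool) (l : List (Int × Int)) :
    PySem.Set.equal (PySem.Set.ofList (l.filter q1)) (PySem.Set.ofList (l.filter q2))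
      = l.all (fun p => q1 p == q2 p) := by
  rw [Bool.eq_iff_iff, PySem.Set.equal_iff, List.all_eq_true]
  simp only [PySem.Set.mem_ofList, List.mem_filter, beq_iff_eq]
  constructor
  · intro h p hp
    have := h p
    cases hq1 : q1 p <;> cases hq2 : q2 p <;> simp_all
  · intro h x
    constructor
    · rintro ⟨hx, hq⟩; exact ⟨hx, by rw [← h x hx]; exact hq⟩
    · rintro ⟨hx, hq⟩; exact ⟨hx, by rw [h x hx]; exact hq⟩

-- A's length-then-equality check collapses to Set.equal (equal sets have equal lengths)
theorem pv_len_equal {α : Type} [BEq α] [LawfulBEq α] (s t : PySem.Set α)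
    (hs : s.Nodup) (ht : t.Nodup) :
    (if PySem.Set.len s == PySem.Set.len t then
       if PySem.Set.equal s t then true else false
     else false) = PySem.Set.equal s t := by
  by_cases h : PySem.Set.equal s t = true
  · have hmem : ∀ x, x ∈ s ↔ x ∈ t := (PySem.Set.equal_iff s t).mp h
    have hperm : s.Perm t := (List.perm_ext_iff_of_nodup hs ht).mpr hmem
    have hlen : s.length = t.length := hperm.length_eq
    simp [PySem.Set.len, h, hlen]
  · simp only [Bool.not_eq_true] at h
    simp [h]

-- ===== VERDICT (by name: the statement is the Claim_ definition above) =====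
theorem compatible_heuristic_spec : Claim_equal_compatible_heuristic := by
  intro n1 n2 sol _
  unfold Spec_compatible_heuristic compatible_heuristic compatible_heuristic_alt
  simp only []
  rw [pv_pair_foldl]
  simp only [pv_foldl_filter, pv_update_empty]
  rw [pv_len_equal _ _ (PySem.Set.nodup_ofList _) (PySem.Set.nodup_ofList _),
      pv_equal_filter]
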